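-- pv_equiv track=rewrite | github.com/mike132129/2020-ADL-SPRING | Final-Project/makedata.py | create_token_type
-- ===== SOURCE A (Python) =====
-- def create_token_type(input_id):
--     state = 'tag' # state is tag, paragraph, text or padding
--     token_type_id = []
--     for idx in input_id:
--
--         if idx == 3 and state == 'tag':
--             token_type_id += [0]
--             state = 'paragraph'
--             continue
--
--         if state == 'tag':
--             token_type_id += [0]
--
--         if idx == 3 and state == 'paragraph':
--             token_type_id += [1]
--             state = 'text'
--             continue
--
--         if state == 'paragraph':
--             token_type_id += [1]
--
--         if idx == 3 and state == 'text':
--             token_type_id += [1]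
--             state = 'padding'
--             continue
--
--         if state == 'text':
--             token_type_id += [1]
--
--         if state == 'padding':
--             token_type_id += [0]
--
--     assert len(input_id) == len(token_type_id)
--
--     return token_type_id
-- ===== SOURCE B (Python) =====
-- def create_token_type(input_id):
--     # run-based: only the first and third occurrences of 3 matter
--     pos = [i for i, v in enumerate(input_id) if v == 3][:3]
--     n = len(input_id)
--     p1 = pos[0] + 1 if len(pos) >= 1 else n
--     p3 = pos[2] + 1 if len(pos) >= 3 else n
--     token_type_id = [0] * p1 + [1] * (p3 - p1) + [0] * (n - p3)
--     assert len(input_id) == len(token_type_id)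
--     return token_type_id
-- ===== Notes on version B (the rewrite author's own statement) =====
-- stated objective: simpler
-- what changed: Replaces A's four-state string state machine stepped per token with a single scan that records the positions of the occurrences of 3 and then concatenates three constant runs: zeros through the first 3, ones through the third 3, zeros after.
import Mathlib
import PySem

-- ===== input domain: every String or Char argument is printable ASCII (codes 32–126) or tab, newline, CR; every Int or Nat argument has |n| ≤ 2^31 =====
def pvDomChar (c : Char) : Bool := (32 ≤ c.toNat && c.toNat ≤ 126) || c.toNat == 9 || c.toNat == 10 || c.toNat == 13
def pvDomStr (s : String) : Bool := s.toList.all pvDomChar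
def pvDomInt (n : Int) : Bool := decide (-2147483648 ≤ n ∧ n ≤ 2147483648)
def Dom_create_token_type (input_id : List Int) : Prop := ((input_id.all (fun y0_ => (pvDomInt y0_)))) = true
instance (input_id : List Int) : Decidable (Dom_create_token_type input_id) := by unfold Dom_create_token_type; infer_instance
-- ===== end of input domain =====

-- B replaces A's four-state string machine by one scan for the positions of 3 followed
-- by a concatenation of three constant runs (objective: simpler).

-- ===== PORT A =====
-- one loop iteration of A: the sequential if/continue chain over state strings
def ctt_step (st : String × List Int) (idx : Int) : String × List Int :=
  if idx = 3 ∧ st.1 = "tag" then ("paragraph", st.2 ++ [0])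
  else if st.1 = "tag" then ("tag", st.2 ++ [0])
  else if idx = 3 ∧ st.1 = "paragraph" then ("text", st.2 ++ [1])
  else if st.1 = "paragraph" then ("paragraph", st.2 ++ [1])
  else if idx = 3 ∧ st.1 = "text" then ("padding", st.2 ++ [1])
  else if st.1 = "text" then ("text", st.2 ++ [1])
  else if st.1 = "padding" then ("padding", st.2 ++ [0])
  else st

def create_token_type (input_id : List Int) : List Int :=
  (input_id.foldl ctt_step ("tag", [])).2
  -- the final `assert len(input_id) == len(token_type_id)` always holds (one emit per element)

-- ===== PORT B =====
def create_token_type_alt (input_id : List Int) : List Int :=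
  let pos := ((PySem.List.enumerate input_id).filterMap
                (fun p => if p.2 = 3 then some p.1 else none)).take 3
  let n : Int := input_id.length
  let p1 : Int := if pos.length ≥ 1 then pos[0]! + 1 else n
  let p3 : Int := if pos.length ≥ 3 then pos[2]! + 1 else n
  List.replicate p1.toNat 0 ++ List.replicate (p3 - p1).toNat 1 ++ List.replicate (n - p3).toNat 0

-- ===== PRECONDITION & SPEC =====
def Spec_create_token_type (input_id : List Int) (out : List Int) : Prop := out = create_token_type_alt input_id
instance (input_id : List Int) (out : List Int) : Decidable (Spec_create_token_type input_id out) := by unfold Spec_create_token_type; infer_instance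

-- ===== CLAIM (what is proved, stated in full; the proofs are below) =====
def Claim_equal_create_token_type : Prop := ∀ (input_id : List Int), Dom_create_token_type input_id → Spec_create_token_type input_id (create_token_type input_id)

-- ===== LEMMAS AND PROOFS =====

-- recursive characterizations of A's output in states "text", "paragraph", "tag"
def C1 : List Int → List Int
  | [] => []
  | x :: r => 1 :: (if x = 3 then List.replicate r.length 0 else C1 r)

def C2 : List Int → List Int
  | [] => []
  | x :: r => 1 :: (if x = 3 then C1 r else C2 r)

def CB : List Int → List Int
  | [] => []
  | x :: r => 0 :: (if x = 3 then C2 r else CB r)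

-- positions (counting from s) of the elements equal to 3
def ctt_threes (s : Int) : List Int → List Int
  | [] => []
  | x :: r => (if x = 3 then [s] else []) ++ ctt_threes (s + 1) r

-- run builders matching B's arithmetic (match on heads instead of length tests)
def run1 (n : Int) (pos : List Int) : List Int :=
  let q : Int := match pos with | a :: _ => a + 1 | [] => n
  List.replicate q.toNat 1 ++ List.replicate (n - q).toNat 0

def run2 (n : Int) (pos : List Int) : List Int :=
  let q : Int := match pos with | _ :: b :: _ => b + 1 | _ => n
  List.replicate q.toNat 1 ++ List.replicate (n - q).toNat 0

def run3 (n : Int) (pos : List Int) : List Int :=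
  let p1 : Int := match pos with | a :: _ => a + 1 | [] => n
  let p3 : Int := match pos with | _ :: _ :: c :: _ => c + 1 | _ => n
  List.replicate p1.toNat 0 ++ List.replicate (p3 - p1).toNat 1 ++ List.replicate (n - p3).toNat 0

lemma enum_filter_eq_threes (l : List Int) (s : Int) :
    (PySem.List.enumerate l s).filterMap (fun p => if p.2 = 3 then some p.1 else none)
      = ctt_threes s l := by
  induction l generalizing s with
  | nil => simp [ctt_threes, PySem.List.enumerate_nil]
  | cons x r ih =>
    simp [ctt_threes, PySem.List.enumerate_cons, List.filterMap_cons, ih]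
    split_ifs <;> simp

lemma ctt_threes_shift (l : List Int) (s t : Int) :
    ctt_threes (s + t) l = (ctt_threes s l).map (· + t) := by
  induction l generalizing s with
  | nil => simp [ctt_threes]
  | cons x r ih =>
    simp only [ctt_threes, List.map_append]
    rw [show s + t + 1 = (s + 1) + t by ring, ih]
    split_ifs <;> simp

lemma ctt_threes_cons (x : Int) (r : List Int) :
    ctt_threes 0 (x :: r) = (if x = 3 then [(0:Int)] else []) ++ (ctt_threes 0 r).map (· + 1) := by
  rw [ctt_threes, show (0:Int) + 1 = 0 + 1 by ring, ctt_threes_shift]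

lemma ctt_threes_nonneg (l : List Int) (s : Int) :
    ∀ x ∈ ctt_threes s l, s ≤ x := by
  induction l generalizing s with
  | nil => simp [ctt_threes]
  | cons y r ih =>
    intro x hx
    simp only [ctt_threes, List.mem_append] at hx
    rcases hx with hx | hx
    · split_ifs at hx <;> simp at hx; omega
    · have := ih (s + 1) x hx; omega

lemma foldA (l : List Int) : ∀ acc : List Int,
    (l.foldl ctt_step ("tag", acc)).2 = acc ++ CB l ∧
    (l.foldl ctt_step ("paragraph", acc)).2 = acc ++ C2 l ∧
    (l.foldl ctt_step ("text", acc)).2 = acc ++ C1 l ∧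
    (l.foldl ctt_step ("padding", acc)).2 = acc ++ List.replicate l.length 0 := by
  induction l with
  | nil => intro acc; simp [CB, C2, C1]
  | cons x r ih =>
    intro acc
    by_cases hx : x = 3 <;>
      simp [List.foldl_cons, ctt_step, hx, CB, C2, C1, (ih _).1, (ih _).2.1,
            (ih _).2.2.1, (ih _).2.2.2, List.replicate_succ]

lemma run1_eq (l : List Int) : run1 l.length (ctt_threes 0 l) = C1 l := by
  induction l with
  | nil => simp [run1, ctt_threes, C1]
  | cons x r ih =>
    rw [ctt_threes_cons]
    by_cases hx : x = 3
    · simp only [hx, if_true, List.singleton_append, C1, run1]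
      simp
    · simp only [hx, if_false, List.nil_append, C1]
      rw [← ih]
      cases h : ctt_threes 0 r with
      | nil => simp [run1, List.replicate_succ]
      | cons a t =>
        have ha : 0 ≤ a := ctt_threes_nonneg r 0 a (by rw [h]; simp)
        simp only [run1, List.map_cons, List.length_cons]
        push_cast
        rw [show ((a:Int)+1+1).toNat = (a+1).toNat + 1 by omega,
            show ((r.length:Int)+1 - (a+1+1)) = (r.length:Int) - (a+1) by ring]
        simp [List.replicate_succ]

lemma run2_eq (l : List Int) : run2 l.length (ctt_threes 0 l) = C2 l := by
  induction l with
  | nil => simp [run2, ctt_threes, C2]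
  | cons x r ih =>
    rw [ctt_threes_cons]
    by_cases hx : x = 3
    · simp only [hx, if_true, List.singleton_append, C2]
      rw [← run1_eq]
      cases h : ctt_threes 0 r with
      | nil => simp [run2, run1, List.replicate_succ]
      | cons a t =>
        have ha : 0 ≤ a := ctt_threes_nonneg r 0 a (by rw [h]; simp)
        simp only [run2, run1, List.map_cons, List.length_cons]
        push_cast
        rw [show ((a:Int)+1+1).toNat = (a+1).toNat + 1 by omega,
            show ((r.length:Int)+1 - (a+1+1)) = (r.length:Int) - (a+1) by ring]
        simp [List.replicate_succ]
    · simp only [hx, if_false, List.nil_append, C2]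
      rw [← ih]
      match h : ctt_threes 0 r with
      | [] => simp [run2, List.replicate_succ]
      | [a] =>
        simp only [run2, List.map_cons, List.map_nil, List.length_cons]
        push_cast
        simp [List.replicate_succ]
      | a :: b :: t =>
        have hb : 0 ≤ b := ctt_threes_nonneg r 0 b (by rw [h]; simp)
        simp only [run2, List.map_cons, List.length_cons]
        push_cast
        rw [show ((b:Int)+1+1).toNat = (b+1).toNat + 1 by omega,
            show ((r.length:Int)+1 - (b+1+1)) = (r.length:Int) - (b+1) by ring]
        simp [List.replicate_succ]

lemma run3_eq (l : List Int) : run3 l.length (ctt_threes 0 l) = CB l := by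
  induction l with
  | nil => simp [run3, ctt_threes, CB]
  | cons x r ih =>
    rw [ctt_threes_cons]
    by_cases hx : x = 3
    · simp only [hx, if_true, List.singleton_append, CB]
      rw [← run2_eq]
      match h : ctt_threes 0 r with
      | [] => simp [run3, run2, List.replicate_succ]
      | [a] =>
        simp only [run3, run2, List.map_cons, List.map_nil, List.length_cons]
        push_cast
        simp
      | a :: b :: t =>
        have hb : 0 ≤ b := ctt_threes_nonneg r 0 b (by rw [h]; simp)
        simp only [run3, run2, List.map_cons, List.length_cons]
        push_cast
        rw [show ((b:Int)+1+1 - 1) = (b:Int)+1 by ring,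
            show ((r.length:Int)+1 - (b+1+1)) = (r.length:Int) - (b+1) by ring]
        simp
    · simp only [hx, if_false, List.nil_append, CB]
      rw [← ih]
      match h : ctt_threes 0 r with
      | [] => simp [run3, List.replicate_succ]
      | [a] =>
        have ha : 0 ≤ a := ctt_threes_nonneg r 0 a (by rw [h]; simp)
        simp only [run3, List.map_cons, List.map_nil, List.length_cons]
        push_cast
        rw [show ((a:Int)+1+1).toNat = (a+1).toNat + 1 by omega,
            show ((r.length:Int)+1 - (a+1+1)) = (r.length:Int) - (a+1) by ring]
        simp [List.replicate_succ]
      | [a, b] =>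
        have ha : 0 ≤ a := ctt_threes_nonneg r 0 a (by rw [h]; simp)
        simp only [run3, List.map_cons, List.map_nil, List.length_cons]
        push_cast
        rw [show ((a:Int)+1+1).toNat = (a+1).toNat + 1 by omega,
            show ((r.length:Int)+1 - (a+1+1)) = (r.length:Int) - (a+1) by ring]
        simp [List.replicate_succ]
      | a :: b :: c :: t =>
        have ha : 0 ≤ a := ctt_threes_nonneg r 0 a (by rw [h]; simp)
        simp only [run3, List.map_cons, List.length_cons]
        push_cast
        rw [show ((a:Int)+1+1).toNat = (a+1).toNat + 1 by omega,
            show ((c:Int)+1+1 - ((a:Int)+1+1)) = (c:Int)+1 - ((a:Int)+1) by ring,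
            show ((r.length:Int)+1 - (c+1+1)) = (r.length:Int) - (c+1) by ring]
        simp [List.replicate_succ]

lemma run3_take (n : Int) (pos : List Int) : run3 n (pos.take 3) = run3 n pos := by
  match pos with
  | [] => rfl
  | [a] => rfl
  | [a, b] => rfl
  | a :: b :: c :: t => simp [run3, List.take]

lemma alt_eq_run3 (l : List Int) : create_token_type_alt l = run3 l.length (ctt_threes 0 l) := by
  rw [create_token_type_alt, enum_filter_eq_threes, ← run3_take]
  match (ctt_threes 0 l).take 3 with
  | [] => rfl
  | [a] => rfl
  | [a, b] => rfl
  | a :: b :: c :: t => simp [run3]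

-- ===== VERDICT (by name: the statement is the Claim_ definition above) =====
theorem create_token_type_spec : Claim_equal_create_token_type := by
  intro l _
  show create_token_type l = create_token_type_alt l
  rw [alt_eq_run3, run3_eq, create_token_type]
  simpa using (foldA l []).1
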